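-- pv_equiv track=rewrite | github.com/kabomekgwe/gospel-keys | backend/app/theory/chord_library.py | parse_chord_symbol
-- ===== SOURCE A (Python) =====
-- from typing import List, Dict, Tuple, Optional
--
-- def parse_chord_symbol(symbol: str) -> Tuple[str, str, Optional[str]]:
--     """
--     Parse a chord symbol into root, quality, and bass note (if slash chord).
--
--     Args:
--         symbol: Chord symbol (e.g., "Cmaj7", "F#m7", "G/B")
--
--     Returns:
--         Tuple of (root, quality, bass_note or None)
--     """
--     # Handle slash chords first
--     bass_note = None
--     if "/" in symbol:
--         parts = symbol.split("/")
--         symbol = parts[0]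
--         bass_note = parts[1] if len(parts) > 1 else None
--
--     # Extract root note
--     if len(symbol) < 1:
--         raise ValueError("Empty chord symbol")
--
--     root = symbol[0].upper()
--     idx = 1
--
--     # Check for accidentals
--     while idx < len(symbol) and symbol[idx] in "#b":
--         root += symbol[idx]
--         idx += 1
--
--     # Rest is quality
--     quality = symbol[idx:] if idx < len(symbol) else ""
--
--     return root, quality, bass_note
-- ===== SOURCE B (Python) =====
-- def parse_chord_symbol(symbol):
--     sym, sep, rest = symbol.partition("/")
--     bass = rest.partition("/")[0] if sep else None
--     if not sym:
--         raise ValueError("Empty chord symbol")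
--     quality = sym[1:].lstrip("#b")
--     root = sym[0].upper() + sym[1 : len(sym) - len(quality)]
--     return root, quality, bass
-- ===== Notes on version B (the rewrite author's own statement) =====
-- stated objective: idiomatic
-- what changed: A scans accidentals with an explicit index-based while loop after list-splitting on '/'; B instead uses partition('/') for the slash handling and computes the quality by stripping the leading '#'/'b' run (lstrip) and the root as the complementary slice, with no index loop.
import Mathlib
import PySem

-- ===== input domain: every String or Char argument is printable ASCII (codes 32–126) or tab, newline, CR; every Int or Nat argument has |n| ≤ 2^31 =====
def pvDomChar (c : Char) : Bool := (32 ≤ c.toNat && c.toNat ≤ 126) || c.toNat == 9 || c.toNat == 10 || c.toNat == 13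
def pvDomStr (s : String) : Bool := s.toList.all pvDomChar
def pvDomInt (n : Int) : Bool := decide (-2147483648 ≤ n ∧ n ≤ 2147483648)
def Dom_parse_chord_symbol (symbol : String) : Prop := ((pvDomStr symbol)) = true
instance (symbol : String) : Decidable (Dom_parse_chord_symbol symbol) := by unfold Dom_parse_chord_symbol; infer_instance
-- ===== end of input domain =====

-- B replaces A's explicit index/while scanning with partition + lstrip-style prefix splitting (idiomatic; same cost).


-- ===== PORT A =====
-- the while loop: while idx < len(symbol) and symbol[idx] in "#b": root += symbol[idx]; idx += 1
def pcsAccLoop (s : List Char) (root : List Char) (idx : Nat) : List Char × Nat :=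
  if h : idx < s.length then
    let c := s[idx]
    -- `symbol[idx] in "#b"` (single-char substring test; "#b".toList = ['#','b'])
    if PySem.Chars.isIn [c] ['#', 'b'] then pcsAccLoop s (root ++ [c]) (idx + 1)
    else (root, idx)
  else (root, idx)
termination_by s.length - idx

def parse_chord_symbol (symbol : String) : String × String × Option String :=
  let t := symbol.toList
  -- if "/" in symbol: parts = symbol.split("/"); symbol = parts[0]; bass = parts[1] if len(parts) > 1 else None
  let sb : List Char × Option (List Char) :=
    if PySem.Chars.isIn ['/'] t then
      let parts := PySem.Chars.splitOn t ['/']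
      (parts.getD 0 [], if 1 < parts.length then some (parts.getD 1 []) else none)
    else (t, none)
  let sym := sb.1
  let bass := sb.2
  if sym.length < 1 then ("", "", bass.map String.ofList)  -- Python raises ValueError("Empty chord symbol") here; excluded by Pre_
  else
    let root0 := [PySem.Chars.upperChar (sym.getD 0 ' ')]  -- symbol[0].upper()
    let ri := pcsAccLoop sym root0 1
    let quality := if ri.2 < sym.length then sym.drop ri.2 else []  -- symbol[idx:] if idx < len(symbol) else ""
    (String.ofList ri.1, String.ofList quality, bass.map String.ofList)

-- ===== PORT B =====
def parse_chord_symbol_alt (symbol : String) : String × String × Option String :=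
  let t := symbol.toList
  -- sym, sep, rest = symbol.partition("/")  (single-char separator: split at the first '/')
  let sym := t.takeWhile (· != '/')
  let sepRest := t.drop sym.length
  -- bass = rest.partition("/")[0] if sep else None
  let bass : Option (List Char) :=
    match sepRest with
    | [] => none
    | _ :: rest => some (rest.takeWhile (· != '/'))
  match sym with
  | [] => ("", "", bass.map String.ofList)  -- Python raises ValueError("Empty chord symbol") here; excluded by Pre_
  | h :: tail =>
    -- quality = sym[1:].lstrip("#b")  (drop the leading run of '#'/'b' characters)
    let quality := tail.dropWhile (fun c => c == '#' || c == 'b')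
    -- root = sym[0].upper() + sym[1 : len(sym) - len(quality)]
    let root := PySem.Chars.upperChar h :: tail.take (tail.length - quality.length)
    (String.ofList root, String.ofList quality, bass.map String.ofList)

-- ===== PRECONDITION & SPEC =====
-- Pre_ excludes exactly the inputs where A raises ValueError("Empty chord symbol"):
-- the empty string and any symbol starting with '/' (empty part before the first slash).
def Pre_parse_chord_symbol (symbol : String) : Prop := symbol.toList.headD '/' ≠ '/'
instance (symbol : String) : Decidable (Pre_parse_chord_symbol symbol) := by unfold Pre_parse_chord_symbol; infer_instance
def pvWitness_parse_chord_symbol : String := "F#m7/A"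

def Spec_parse_chord_symbol (symbol : String) (out : String × String × Option String) : Prop := out = parse_chord_symbol_alt symbol
instance (symbol : String) (out : String × String × Option String) : Decidable (Spec_parse_chord_symbol symbol out) := by unfold Spec_parse_chord_symbol; infer_instance

-- ===== CLAIM (what is proved, stated in full; the proofs are below) =====
def Claim_equal_parse_chord_symbol : Prop := ∀ (symbol : String), Dom_parse_chord_symbol symbol → Pre_parse_chord_symbol symbol → Spec_parse_chord_symbol symbol (parse_chord_symbol symbol)

-- ===== LEMMAS AND PROOFS =====
-- generic list facts
theorem pcs_dropWhile_eq_drop (p : Char → Bool) (l : List Char) :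
    l.dropWhile p = l.drop (l.takeWhile p).length := by
  induction l with
  | nil => simp
  | cons a l ih => by_cases h : p a <;> simp [h, ih]

theorem pcs_isIn_singleton (c : Char) (l : List Char) :
    PySem.Chars.isIn [c] l = true ↔ c ∈ l := by
  rw [PySem.Chars.isIn_iff_infix]
  constructor
  · intro hin
    exact List.singleton_sublist.mp hin.sublist
  · intro hc
    obtain ⟨s, t, rfl⟩ := List.append_of_mem hc
    exact ⟨s, t, by simp⟩

theorem pcs_isIn_acc (c : Char) : PySem.Chars.isIn [c] ['#', 'b'] = (c == '#' || c == 'b') := by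
  by_cases h1 : c = '#'
  · subst h1; decide
  by_cases h2 : c = 'b'
  · subst h2; decide
  have hf : PySem.Chars.isIn [c] ['#', 'b'] = false := by
    rcases hx : PySem.Chars.isIn [c] ['#', 'b'] with _ | _
    · rfl
    · have := (pcs_isIn_singleton c ['#', 'b']).mp hx
      simp at this
      tauto
  simp [hf, h1, h2]

-- reference splitter: pcsSplit l = l.split('/') (structural form used to characterise PySem.Chars.splitOn)
def pcsSplit : List Char → List (List Char)
  | [] => [[]]
  | c :: rest => if c = '/' then [] :: pcsSplit rest else (pcsSplit rest).modifyHead (c :: ·)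

theorem pcsSplit_ne_nil (l : List Char) : pcsSplit l ≠ [] := by
  cases l with
  | nil => simp [pcsSplit]
  | cons c rest =>
    by_cases h : c = '/' <;> simp [pcsSplit, h]
    cases hr : pcsSplit rest with
    | nil => exact absurd hr (pcsSplit_ne_nil rest)
    | cons a b => simp

theorem pcs_go_eq : ∀ (fuel : Nat) (l cur : List Char) (acc : List (List Char)), l.length < fuel →
    PySem.Chars.splitOn.go ['/'] fuel l cur acc = acc.reverse ++ (pcsSplit l).modifyHead (cur.reverse ++ ·) := by
  intro fuel
  induction fuel with
  | zero => intro l cur acc h; omega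
  | succ fuel ih =>
    intro l cur acc h
    cases l with
    | nil =>
      rw [PySem.Chars.splitOn.go]
      simp [pcsSplit]
      omega
    | cons c rest =>
      by_cases hc : c = '/'
      · subst hc
        rw [PySem.Chars.splitOn.go]
        simp only [List.isPrefixOf, beq_self_eq_true, Bool.true_and, if_true]
        have hdrop : List.drop ['/'].length ('/' :: rest) = rest := rfl
        rw [hdrop, ih rest [] ((cur.reverse) :: acc) (by simp at h ⊢; omega)]
        obtain ⟨a, ps, hps⟩ := List.exists_cons_of_ne_nil (pcsSplit_ne_nil rest)
        simp [pcsSplit, hps]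
      · rw [PySem.Chars.splitOn.go]
        have hpre : (['/'].isPrefixOf (c :: rest)) = false := by
          simp [List.isPrefixOf]; exact fun hh => hc hh.symm
        simp only [hpre, Bool.false_eq_true, if_false]
        rw [ih rest (c :: cur) acc (by simp at h ⊢; omega)]
        obtain ⟨a, ps, hps⟩ := List.exists_cons_of_ne_nil (pcsSplit_ne_nil rest)
        simp [pcsSplit, hc, hps]

theorem pcs_splitOn_eq (t : List Char) : PySem.Chars.splitOn t ['/'] = pcsSplit t := by
  unfold PySem.Chars.splitOn
  rw [pcs_go_eq (t.length + 1) t [] [] (by omega)]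
  obtain ⟨a, ps, hps⟩ := List.exists_cons_of_ne_nil (pcsSplit_ne_nil t)
  simp [hps]

theorem pcsSplit_getD0 (t : List Char) : (pcsSplit t).getD 0 [] = t.takeWhile (· != '/') := by
  induction t with
  | nil => simp [pcsSplit]
  | cons c rest ih =>
    by_cases h : c = '/'
    · simp [pcsSplit, h]
    · obtain ⟨a, ps, hps⟩ := List.exists_cons_of_ne_nil (pcsSplit_ne_nil rest)
      rw [hps] at ih
      simp [pcsSplit, h, hps]
      simpa using ih

theorem pcsSplit_slash (t : List Char) (h : '/' ∈ t) :
    1 < (pcsSplit t).length ∧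
      (pcsSplit t).getD 1 [] = ((t.dropWhile (· != '/')).drop 1).takeWhile (· != '/') := by
  induction t with
  | nil => simp at h
  | cons c rest ih =>
    by_cases hc : c = '/'
    · subst hc
      obtain ⟨a, ps, hps⟩ := List.exists_cons_of_ne_nil (pcsSplit_ne_nil rest)
      have h0 := pcsSplit_getD0 rest
      rw [hps] at h0
      simp [pcsSplit, hps]
      simpa using h0
    · have hmem : '/' ∈ rest := by
        rcases List.mem_cons.mp h with h1 | h1
        · exact absurd h1.symm hc
        · exact h1
      obtain ⟨hlen, hgd⟩ := ih hmem
      obtain ⟨a, ps, hps⟩ := List.exists_cons_of_ne_nil (pcsSplit_ne_nil rest)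
      rw [hps] at hlen hgd
      refine ⟨?_, ?_⟩
      · simpa [pcsSplit, hc, hps] using hlen
      · simpa [pcsSplit, hc, hps] using hgd

theorem pcsAccLoop_eq (s : List Char) : ∀ (idx : Nat) (root : List Char),
    pcsAccLoop s root idx =
      (root ++ (s.drop idx).takeWhile (fun c => c == '#' || c == 'b'),
       idx + ((s.drop idx).takeWhile (fun c => c == '#' || c == 'b')).length) := by
  intro idx
  induction hn : s.length - idx using Nat.strong_induction_on generalizing idx with
  | _ n ihh =>
  intro root
  rw [pcsAccLoop]
  by_cases h : idx < s.length
  · simp only [h, dif_pos]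
    rw [pcs_isIn_acc]
    rw [List.drop_eq_getElem_cons h]
    rcases hb : (s[idx] == '#' || s[idx] == 'b') with _ | _
    · simp [hb]
    · simp only [hb, if_true]
      rw [ihh (s.length - (idx + 1)) (by omega) (idx + 1) rfl]
      rw [List.takeWhile_cons, hb]
      simp [Prod.ext_iff]
      omega
  · have hge : s.length ≤ idx := by omega
    simp [h, List.drop_eq_nil_of_le hge]

theorem pcs_takeWhile_no_slash (l : List Char) (h : '/' ∉ l) : l.takeWhile (· != '/') = l := by
  rw [List.takeWhile_eq_self_iff]
  intro a ha
  simp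
  intro e
  exact h (e ▸ ha)

theorem pcs_dropWhile_ne_nil (l : List Char) (h : '/' ∈ l) : l.dropWhile (· != '/') ≠ [] := by
  intro hnil
  rw [List.dropWhile_eq_nil_iff] at hnil
  have := hnil '/' h
  simp at this

theorem pcs_len_split (tl : List Char) :
    (tl.takeWhile (fun c => c == '#' || c == 'b')).length
      + (tl.dropWhile (fun c => c == '#' || c == 'b')).length = tl.length := by
  rw [← List.length_append, List.takeWhile_append_dropWhile]

theorem pcs_root_eq (h0 : Char) (tl : List Char) (u : Char) :
    (pcsAccLoop (h0 :: tl) [u] 1).1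
      = u :: tl.take (tl.length - (tl.dropWhile (fun c => c == '#' || c == 'b')).length) := by
  rw [pcsAccLoop_eq]
  have hlen := pcs_len_split tl
  have htake : tl.take (tl.length - (tl.dropWhile (fun c => c == '#' || c == 'b')).length)
      = tl.takeWhile (fun c => c == '#' || c == 'b') := by
    have he : tl.length - (tl.dropWhile (fun c => c == '#' || c == 'b')).length
        = (tl.takeWhile (fun c => c == '#' || c == 'b')).length := by omega
    rw [he]
    exact (List.prefix_iff_eq_take.mp (List.takeWhile_prefix _)).symm
  simp [htake]

theorem pcs_quality_eq (h0 : Char) (tl : List Char) (u : Char) :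
    (if (pcsAccLoop (h0 :: tl) [u] 1).2 < (h0 :: tl).length
     then (h0 :: tl).drop (pcsAccLoop (h0 :: tl) [u] 1).2 else [])
      = tl.dropWhile (fun c => c == '#' || c == 'b') := by
  rw [pcsAccLoop_eq]
  simp only [List.drop_succ_cons, List.drop_zero, List.length_cons]
  by_cases hq : 1 + (List.takeWhile (fun c => c == '#' || c == 'b') tl).length < tl.length + 1
  · rw [if_pos hq]
    have he : 1 + (List.takeWhile (fun c => c == '#' || c == 'b') tl).length
        = (List.takeWhile (fun c => c == '#' || c == 'b') tl).length + 1 := by omega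
    rw [he, List.drop_succ_cons, ← pcs_dropWhile_eq_drop]
  · rw [if_neg hq]
    symm
    rw [pcs_dropWhile_eq_drop]
    exact List.drop_eq_nil_of_le (by omega)

-- ===== VERDICT =====
theorem parse_chord_symbol_spec : Claim_equal_parse_chord_symbol := by
  intro symbol _ hpre
  unfold Spec_parse_chord_symbol
  unfold Pre_parse_chord_symbol at hpre
  cases ht : symbol.toList with
  | nil => rw [ht] at hpre; simp at hpre
  | cons h0 tl =>
  rw [ht] at hpre
  simp only [List.headD_cons] at hpre
  have hph0 : (h0 != '/') = true := by simp [hpre]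
  unfold parse_chord_symbol parse_chord_symbol_alt
  rw [ht]
  have hsym0 : (h0 :: tl).takeWhile (· != '/') = h0 :: tl.takeWhile (· != '/') := by
    simp [hph0]
  by_cases hs : '/' ∈ h0 :: tl
  · -- slash chord
    have hin : PySem.Chars.isIn ['/'] (h0 :: tl) = true := (pcs_isIn_singleton _ _).mpr hs
    obtain ⟨hlen1, hgd1⟩ := pcsSplit_slash (h0 :: tl) hs
    obtain ⟨d, r, hdr⟩ := List.exists_cons_of_ne_nil (pcs_dropWhile_ne_nil _ hs)
    rw [hdr] at hgd1
    have hdr' : tl.dropWhile (· != '/') = d :: r := by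
      rw [← hdr]
      simp [hph0]
    have hdrop : List.drop ((tl.takeWhile (· != '/')).length + 1) (h0 :: tl) = d :: r := by
      rw [List.drop_succ_cons, ← pcs_dropWhile_eq_drop, hdr']
    simp only [List.drop_succ_cons, List.drop_zero] at hgd1
    simp only [hin, if_true, pcs_splitOn_eq, pcsSplit_getD0, if_pos hlen1, hgd1, hdrop, hsym0,
      List.length_cons, List.getD_cons_zero]
    rw [if_neg (by simp)]
    simp only [Prod.mk.injEq]
    refine ⟨?_, ?_, trivial⟩
    · exact congrArg String.ofList (by
        have := pcs_root_eq h0 (tl.takeWhile (· != '/')) (PySem.Chars.upperChar h0)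
        simpa using this)
    · exact congrArg String.ofList (by
        have := pcs_quality_eq h0 (tl.takeWhile (· != '/')) (PySem.Chars.upperChar h0)
        simpa using this)
  · -- no slash
    have hin : PySem.Chars.isIn ['/'] (h0 :: tl) = false := by
      rcases hx : PySem.Chars.isIn ['/'] (h0 :: tl) with _ | _
      · rfl
      · exact absurd ((pcs_isIn_singleton _ _).mp hx) hs
    have htw : (h0 :: tl).takeWhile (· != '/') = h0 :: tl := pcs_takeWhile_no_slash _ hs
    have hdropnil : List.drop (tl.length + 1) (h0 :: tl) = [] := by simp
    simp only [hin, Bool.false_eq_true, if_false, htw, List.length_cons, hdropnil,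
      List.getD_cons_zero]
    rw [if_neg (by simp)]
    simp only [Prod.mk.injEq]
    refine ⟨?_, ?_, trivial⟩
    · exact congrArg String.ofList (by
        have := pcs_root_eq h0 tl (PySem.Chars.upperChar h0)
        simpa using this)
    · exact congrArg String.ofList (by
        have := pcs_quality_eq h0 tl (PySem.Chars.upperChar h0)
        simpa using this)
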